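-- pv_equiv track=rewrite | github.com/xtofuub/openrecon-ios | skills/building-devsecops-pipeline-with-gitlab-ci/scripts/process.py | check_security_scanners
-- ===== SOURCE A (Python) =====
-- def check_security_scanners(jobs: list) -> dict:
--     scanner_names = {
--         "sast": False,
--         "secret_detection": False,
--         "dependency_scanning": False,
--         "container_scanning": False,
--         "dast": False,
--         "license_scanning": False,
--     }
--     for job in jobs:
--         name = job.get("name", "").lower()
--         for scanner in scanner_names:
--             if scanner.replace("_", "-") in name or scanner in name:
--                 scanner_names[scanner] = True
--     return scanner_names
-- ===== SOURCE B (Python) =====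
-- SCANNERS = ["sast", "secret_detection", "dependency_scanning",
--             "container_scanning", "dast", "license_scanning"]
--
--
-- def check_security_scanners(jobs: list) -> dict:
--     # Concatenate every job name into one newline-separated text, normalize it
--     # once (lowercase, dashes folded to underscores), then do a single substring
--     # test per scanner key against that text. Correct because no scanner key
--     # contains a newline (so a match cannot cross two names) and each key has at
--     # most one underscore (so dash-folding captures exactly the dashed variant).
--     blob = "\n".join(job.get("name", "") for job in jobs).lower().replace("-", "_")
--     return {s: s in blob for s in SCANNERS}
-- ===== Notes on version B (the rewrite author's own statement) =====
-- stated objective: alternative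
-- what changed: Replaces A's nested per-job/per-scanner double substring test with a one-shot text search: all names are joined into one newline-separated blob, lowercased and dash-folded to underscores once, and each scanner key is then tested by a single membership test against that blob (correct since no key contains a newline and each key has at most one underscore).
import Mathlib
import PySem

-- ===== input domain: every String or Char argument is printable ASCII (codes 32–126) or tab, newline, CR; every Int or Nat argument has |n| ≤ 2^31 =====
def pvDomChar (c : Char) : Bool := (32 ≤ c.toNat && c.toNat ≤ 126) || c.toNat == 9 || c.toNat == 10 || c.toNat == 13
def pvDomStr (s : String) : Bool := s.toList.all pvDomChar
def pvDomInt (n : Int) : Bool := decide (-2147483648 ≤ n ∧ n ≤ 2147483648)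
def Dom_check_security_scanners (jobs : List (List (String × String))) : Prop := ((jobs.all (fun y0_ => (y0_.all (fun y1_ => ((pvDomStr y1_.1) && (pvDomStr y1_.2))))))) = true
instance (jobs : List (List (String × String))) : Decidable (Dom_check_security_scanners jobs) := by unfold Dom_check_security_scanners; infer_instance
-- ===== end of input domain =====

-- B replaces A's nested per-job/per-scanner double substring test with a one-shot text
-- search: all names are joined into one newline-separated blob, normalized once
-- (lowercase, '-' folded to '_'), and each scanner key is tested once against that blob
-- (objective: alternative).

-- ===== PORT A =====
def check_security_scanners (jobs : List (List (String × String))) : List (String × Bool) :=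
  let scanner_names : PySem.Dict String Bool :=
    PySem.Dict.ofList [("sast", false), ("secret_detection", false), ("dependency_scanning", false),
      ("container_scanning", false), ("dast", false), ("license_scanning", false)]
  let final := jobs.foldl (fun d job =>
    let name := PySem.Str.lower (PySem.Dict.getD (PySem.Dict.mk job) "name" "")
    d.keys.foldl (fun d' scanner =>
      if PySem.Str.isIn (PySem.Str.replace scanner "_" "-") name || PySem.Str.isIn scanner name
      then d'.insert scanner true else d') d) scanner_names
  final.items

-- ===== PORT B =====
def pvScanners : List String :=
  ["sast", "secret_detection", "dependency_scanning", "container_scanning", "dast", "license_scanning"]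

def check_security_scanners_alt (jobs : List (List (String × String))) : List (String × Bool) :=
  let blob := PySem.Str.replace (PySem.Str.lower (PySem.Str.join "\n"
    (jobs.map (fun job => PySem.Dict.getD (PySem.Dict.mk job) "name" "")))) "-" "_"
  pvScanners.map (fun s => (s, PySem.Str.isIn s blob))

-- ===== PRECONDITION & SPEC =====
def Spec_check_security_scanners (jobs : List (List (String × String))) (out : List (String × Bool)) : Prop := out = check_security_scanners_alt jobs
instance (jobs : List (List (String × String))) (out : List (String × Bool)) : Decidable (Spec_check_security_scanners jobs out) := by unfold Spec_check_security_scanners; infer_instance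

-- ===== CLAIM (what is proved, stated in full; the proofs are below) =====
def Claim_equal_check_security_scanners : Prop := ∀ (jobs : List (List (String × String))), Dom_check_security_scanners jobs → Spec_check_security_scanners jobs (check_security_scanners jobs)

-- ===== LEMMAS AND PROOFS =====

-- the flag dict A maintains, with its six values symbolic
def pvD (b1 b2 b3 b4 b5 b6 : Bool) : PySem.Dict String Bool :=
  PySem.Dict.mk [("sast", b1), ("secret_detection", b2), ("dependency_scanning", b3),
    ("container_scanning", b4), ("dast", b5), ("license_scanning", b6)]

def pvHit (s n : String) : Bool :=
  PySem.Str.isIn (PySem.Str.replace s "_" "-") n || PySem.Str.isIn s n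

def pvName (job : List (String × String)) : String :=
  PySem.Str.lower (PySem.Dict.getD (PySem.Dict.mk job) "name" "")

lemma pv_keys (b1 b2 b3 b4 b5 b6 : Bool) : (pvD b1 b2 b3 b4 b5 b6).keys = pvScanners := rfl

lemma pv_step (b1 b2 b3 b4 b5 b6 : Bool) (name : String) :
    pvScanners.foldl (fun d' scanner =>
        if PySem.Str.isIn (PySem.Str.replace scanner "_" "-") name || PySem.Str.isIn scanner name
        then d'.insert scanner true else d') (pvD b1 b2 b3 b4 b5 b6)
    = pvD (b1 || pvHit "sast" name) (b2 || pvHit "secret_detection" name)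
        (b3 || pvHit "dependency_scanning" name) (b4 || pvHit "container_scanning" name)
        (b5 || pvHit "dast" name) (b6 || pvHit "license_scanning" name) := by
  simp only [pvScanners, List.foldl, pvHit]
  cases h1 : PySem.Str.isIn (PySem.Str.replace "sast" "_" "-") name || PySem.Str.isIn "sast" name <;>
  cases h2 : PySem.Str.isIn (PySem.Str.replace "secret_detection" "_" "-") name || PySem.Str.isIn "secret_detection" name <;>
  cases h3 : PySem.Str.isIn (PySem.Str.replace "dependency_scanning" "_" "-") name || PySem.Str.isIn "dependency_scanning" name <;>
  cases h4 : PySem.Str.isIn (PySem.Str.replace "container_scanning" "_" "-") name || PySem.Str.isIn "container_scanning" name <;>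
  cases h5 : PySem.Str.isIn (PySem.Str.replace "dast" "_" "-") name || PySem.Str.isIn "dast" name <;>
  cases h6 : PySem.Str.isIn (PySem.Str.replace "license_scanning" "_" "-") name || PySem.Str.isIn "license_scanning" name <;>
    simp only [Bool.or_true, Bool.or_false, if_true] <;> rfl

lemma pv_fold (jobs : List (List (String × String))) (b1 b2 b3 b4 b5 b6 : Bool) :
    jobs.foldl (fun d job =>
        let name := PySem.Str.lower (PySem.Dict.getD (PySem.Dict.mk job) "name" "")
        d.keys.foldl (fun d' scanner =>
          if PySem.Str.isIn (PySem.Str.replace scanner "_" "-") name || PySem.Str.isIn scanner name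
          then d'.insert scanner true else d') d) (pvD b1 b2 b3 b4 b5 b6)
    = pvD (b1 || (jobs.map pvName).any (pvHit "sast"))
        (b2 || (jobs.map pvName).any (pvHit "secret_detection"))
        (b3 || (jobs.map pvName).any (pvHit "dependency_scanning"))
        (b4 || (jobs.map pvName).any (pvHit "container_scanning"))
        (b5 || (jobs.map pvName).any (pvHit "dast"))
        (b6 || (jobs.map pvName).any (pvHit "license_scanning")) := by
  induction jobs generalizing b1 b2 b3 b4 b5 b6 with
  | nil => simp [List.foldl]
  | cons job rest ih =>
      simp only [List.foldl, List.map, List.any_cons]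
      rw [pv_keys, pv_step, ih]
      simp only [pvName, Bool.or_assoc]

-- normalization maps: pvF folds '-' to '_' (what B's replace does per char);
-- pvG produces the dashed variant of a scanner key
def pvF (c : Char) : Char := if c = '-' then '_' else c
def pvG (c : Char) : Char := if c = '_' then '-' else c
def pvDash (p : List Char) : List Char := p.map pvG

lemma pvDash_eq_self {p : List Char} (h : '_' ∉ p) : pvDash p = p := by
  induction p with
  | nil => rfl
  | cons a t ih =>
    simp only [pvDash, List.map] at ih ⊢
    rw [ih (fun hm => h (List.mem_cons_of_mem a hm))]
    have : a ≠ '_' := fun e => h (e ▸ List.mem_cons_self)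
    simp [pvG, this]

lemma pv_map_id {p : List Char} (h : '-' ∉ p) : p.map pvF = p := by
  induction p with
  | nil => rfl
  | cons a t ih =>
    simp only [List.map]
    rw [ih (fun hm => h (List.mem_cons_of_mem a hm))]
    have : a ≠ '-' := fun e => h (e ▸ List.mem_cons_self)
    simp [pvF, this]

lemma pv_map_dash {p : List Char} (h : '-' ∉ p) : (pvDash p).map pvF = p := by
  induction p with
  | nil => rfl
  | cons a t ih =>
    simp only [pvDash, List.map] at ih ⊢
    rw [ih (fun hm => h (List.mem_cons_of_mem a hm))]
    have ha : a ≠ '-' := fun e => h (e ▸ List.mem_cons_self)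
    by_cases h2 : a = '_' <;> simp [pvF, pvG, h2, ha]

-- the preimages under pvF of a key with no '-' and at most one '_' are the key and its dashed variant
lemma pv_preimage : ∀ (p : List Char), '-' ∉ p → p.count '_' ≤ 1 →
    ∀ w, (w.map pvF = p ↔ w = p ∨ w = pvDash p) := by
  intro p
  induction p with
  | nil => intro _ _ w; simp [pvDash]
  | cons a p' ih =>
    intro hd hcnt w
    have hd' : '-' ∉ p' := fun hm => hd (List.mem_cons_of_mem a hm)
    have ha : a ≠ '-' := fun e => hd (e ▸ List.mem_cons_self)
    rw [List.map_eq_cons_iff]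
    by_cases h2 : a = '_'
    · subst h2
      have hcnt' : p'.count '_' = 0 := by
        have := List.count_cons_self (a := '_') (l := p')
        omega
      have hnp' : '_' ∉ p' := by
        intro hm; have := List.count_pos_iff.mpr hm; omega
      have hmap : ∀ t : List Char, (t.map pvF = p' ↔ t = p') := by
        intro t
        rw [ih hd' (by omega) t, pvDash_eq_self hnp', or_self]
      constructor
      · rintro ⟨c, t, rfl, hfc, hmt⟩
        have hc : c = '_' ∨ c = '-' := by
          by_cases hcc : c = '-'
          · exact Or.inr hcc
          · left; simpa [pvF, hcc] using hfc
        rcases hc with rfl | rfl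
        · exact Or.inl (by rw [(hmap t).mp hmt])
        · right
          rw [(hmap t).mp hmt]
          have : List.map pvG p' = p' := pvDash_eq_self hnp'
          simp [pvDash, List.map, pvG, this]
      · rintro (rfl | hw)
        · exact ⟨'_', p', rfl, by simp [pvF], (hmap p').mpr rfl⟩
        · refine ⟨'-', p', ?_, by simp [pvF], (hmap p').mpr rfl⟩
          have : List.map pvG p' = p' := pvDash_eq_self hnp'
          rw [hw]; simp [pvDash, pvG, this]
    · have hcnt' : p'.count '_' ≤ 1 := by
        have := List.count_cons_of_ne (h := h2) (l := p')
        omega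
      constructor
      · rintro ⟨c, t, rfl, hfc, hmt⟩
        have hc : c = a := by
          have hcc : c ≠ '-' := by
            intro e; subst e; simp [pvF] at hfc; exact h2 hfc.symm
          simpa [pvF, hcc] using hfc
        subst hc
        rcases (ih hd' hcnt' t).mp hmt with rfl | h
        · exact Or.inl rfl
        · exact Or.inr (by simp [pvDash, List.map, pvG, h2, h])
      · rintro (rfl | hw)
        · exact ⟨a, p', rfl, by simp [pvF, ha], ((ih hd' hcnt' p').mpr (Or.inl rfl))⟩
        · refine ⟨a, pvDash p', ?_, by simp [pvF, ha], ((ih hd' hcnt' _).mpr (Or.inr rfl))⟩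
          rw [hw]; simp [pvDash, List.map, pvG, h2]

-- PySem.Chars.replace with single-char arguments is a character map
lemma pv_go (fuel : Nat) : ∀ (l acc : List Char), l.length ≤ fuel →
    PySem.Chars.replace.go ['-'] ['_'] fuel l acc = acc.reverse ++ l.map pvF := by
  induction fuel with
  | zero => intro l acc h; rw [List.length_eq_zero_iff.mp (Nat.le_zero.mp h)]; simp [PySem.Chars.replace.go]
  | succ n ih =>
    intro l acc h
    cases l with
    | nil => simp [PySem.Chars.replace.go]
    | cons c t =>
      simp only [PySem.Chars.replace.go, List.isPrefixOf, List.map]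
      by_cases hc : c = '-'
      · subst hc
        rw [if_pos (by decide), ih _ _ (by simpa using Nat.le_of_succ_le_succ h)]
        simp [pvF]
      · rw [if_neg (by simp; exact fun hh => hc hh.symm), ih _ _ (by simpa using Nat.le_of_succ_le_succ h)]
        simp [pvF, hc]

lemma pv_replace (m : List Char) : PySem.Chars.replace m ['-'] ['_'] = m.map pvF := by
  simp [PySem.Chars.replace, pv_go m.length m [] le_rfl]

lemma pv_map_intercalate (f : Char → Char) (s : List Char) (ls : List (List Char)) :
    (s.intercalate ls).map f = (s.map f).intercalate (ls.map (List.map f)) := by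
  induction ls with
  | nil => simp [List.intercalate]
  | cons a l ih =>
    cases l with
    | nil => simp [List.intercalate]
    | cons b t => simp [List.intercalate, List.intersperse] at ih ⊢; simp [ih]

-- a pattern avoiding c is an infix of xs ++ c :: ys iff it is an infix of xs or of ys
lemma pv_split {p xs ys : List Char} {c : Char} (hc : c ∉ p) :
    p <:+: xs ++ c :: ys ↔ p <:+: xs ∨ p <:+: ys := by
  constructor
  · rintro ⟨s, t, h⟩
    by_cases hp : p = []
    · subst hp; exact Or.inr (List.nil_infix)
    by_cases hA : s.length + p.length ≤ xs.length
    · left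
      have h1 : s ++ p = xs.take (s.length + p.length) := by
        calc s ++ p = ((s ++ p) ++ t).take (s ++ p).length := List.take_left.symm
          _ = (xs ++ c :: ys).take (s.length + p.length) := by rw [List.length_append, h]
          _ = xs.take (s.length + p.length) := List.take_append_of_le_length hA
      have h2 : s ++ p <+: xs := h1 ▸ List.take_prefix _ xs
      exact (List.suffix_append s p).isInfix.trans h2.isInfix
    · by_cases hB : xs.length ≤ s.length
      · right
        have h2 : s.drop xs.length ++ (p ++ t) = c :: ys := by
          have := congrArg (List.drop xs.length) h
          rwa [List.append_assoc, List.drop_append_of_le_length hB, List.drop_left] at this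
        cases hsd : s.drop xs.length with
        | nil =>
          rw [hsd, List.nil_append] at h2
          cases p with
          | nil => exact absurd rfl hp
          | cons a p' =>
            exfalso; apply hc
            have : a = c := (List.cons_eq_cons.mp h2).1
            simp [← this]
        | cons d s' =>
          rw [hsd] at h2
          refine ⟨s', t, ?_⟩
          have h5 : ys = s' ++ (p ++ t) := by
            have := (List.cons_eq_cons.mp h2).2
            simpa using this.symm
          rw [h5, List.append_assoc]
      · exfalso; apply hc
        have h3 : p ++ t = xs.drop s.length ++ c :: ys := by
          have := congrArg (List.drop s.length) h
          rwa [List.append_assoc, List.drop_left, List.drop_append_of_le_length (by omega)] at this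
        have h4 : p = (xs.drop s.length ++ c :: ys).take p.length := by
          rw [← h3]; exact List.take_left.symm
        rw [h4, List.take_append]
        apply List.mem_append_right
        have hk : 0 < p.length - (xs.drop s.length).length := by
          rw [List.length_drop]; omega
        cases hkk : p.length - (xs.drop s.length).length with
        | zero => omega
        | succ m => simp
  · rintro (h | h)
    · exact List.infix_append_of_infix_left h
    · exact List.infix_append_of_infix_right (h.trans (List.suffix_cons c ys).isInfix)

-- membership of a key in the dash-folded text equals the two-pattern membership A tests
lemma pv_L4 {p : List Char} (m : List Char) (h1 : '-' ∉ p) (h2 : p.count '_' ≤ 1) :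
    PySem.Chars.isIn p (m.map pvF) = (PySem.Chars.isIn (pvDash p) m || PySem.Chars.isIn p m) := by
  rw [Bool.eq_iff_iff]
  simp only [Bool.or_eq_true, PySem.Chars.isIn_iff_infix]
  constructor
  · rintro ⟨s, t, h⟩
    have h' : m.map pvF = s ++ (p ++ t) := by rw [← List.append_assoc]; exact h.symm
    obtain ⟨u, vw, hm, hu, hvw⟩ := List.map_eq_append_iff.mp h'
    obtain ⟨w, v, hvw', hw, hv⟩ := List.map_eq_append_iff.mp hvw
    rcases (pv_preimage p h1 h2 w).mp hw with h9 | h9 <;> subst h9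
    · exact Or.inr ⟨u, v, by rw [hm, hvw', List.append_assoc]⟩
    · exact Or.inl ⟨u, v, by rw [hm, hvw', List.append_assoc]⟩
  · rintro (h | h)
    · have := h.map pvF
      rwa [pv_map_dash h1] at this
    · have := h.map pvF
      rwa [pv_map_id h1] at this

-- membership of a newline-free key in the newline-joined text equals membership in some part
lemma pv_L3 (p : List Char) (hne : p ≠ []) (hnl : '\n' ∉ p) (ms : List (List Char)) :
    PySem.Chars.isIn p (List.intercalate ['\n'] ms) = ms.any (fun m => PySem.Chars.isIn p m) := by
  induction ms with
  | nil =>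
    simp only [List.intercalate, List.any_nil]
    rw [Bool.eq_false_iff]
    intro hcon
    rw [PySem.Chars.isIn_iff_infix] at hcon
    exact hne (List.infix_nil.mp (by simpa using hcon))
  | cons m ms ih =>
    cases ms with
    | nil => simp [List.intercalate]
    | cons b t =>
      have hstep : List.intercalate ['\n'] (m :: b :: t) = m ++ '\n' :: List.intercalate ['\n'] (b :: t) := by
        simp [List.intercalate, List.intersperse]
      rw [hstep, List.any_cons]
      rw [Bool.eq_iff_iff]
      simp only [Bool.or_eq_true, PySem.Chars.isIn_iff_infix, pv_split hnl]
      rw [← ih]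
      simp [PySem.Chars.isIn_iff_infix]

-- per-scanner bridge: A's any-over-names test equals B's one membership test in the blob
lemma pv_scan (jobs : List (List (String × String))) (p pd : String)
    (hpd : PySem.Str.replace p "_" "-" = pd)
    (hdash : pvDash p.toList = pd.toList)
    (h1 : '-' ∉ p.toList) (h2 : p.toList.count '_' ≤ 1)
    (hne : p.toList ≠ []) (hnl : '\n' ∉ p.toList) :
    PySem.Str.isIn p (PySem.Str.replace (PySem.Str.lower (PySem.Str.join "\n" (jobs.map (fun job => PySem.Dict.getD (PySem.Dict.mk job) "name" "")))) "-" "_")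
      = (jobs.map pvName).any (pvHit p) := by
  rw [PySem.Str.isIn_eq, PySem.Str.toList_replace, PySem.Str.toList_lower, PySem.Str.toList_join]
  have hsep : ("\n" : String).toList = ['\n'] := rfl
  have hmins : ("-" : String).toList = ['-'] := rfl
  have hplus : ("_" : String).toList = ['_'] := rfl
  rw [hsep, hmins, hplus, pv_replace]
  show PySem.Chars.isIn p.toList
      ((List.map PySem.Chars.lowerChar (List.intercalate ['\n'] ((jobs.map (fun job => PySem.Dict.getD (PySem.Dict.mk job) "name" "")).map String.toList))).map pvF) = _
  rw [pv_map_intercalate PySem.Chars.lowerChar,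
    show (List.map PySem.Chars.lowerChar ['\n']) = ['\n'] from by decide,
    pv_map_intercalate pvF,
    show (List.map pvF ['\n']) = ['\n'] from by decide]
  rw [pv_L3 p.toList hne hnl]
  simp only [List.map_map, List.any_map, List.map_map]
  apply List.any_congr rfl
  intro job
  simp only [Function.comp]
  rw [pv_L4 _ h1 h2, hdash]
  simp only [pvHit, pvName, hpd, PySem.Str.isIn_eq, PySem.Str.toList_lower]
  rw [PySem.Chars.lower]

-- ===== VERDICT (by name: the statement is the Claim_ definition above) =====
theorem check_security_scanners_spec : Claim_equal_check_security_scanners := by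
  intro jobs _
  have hinit : (PySem.Dict.ofList [("sast", false), ("secret_detection", false), ("dependency_scanning", false),
      ("container_scanning", false), ("dast", false), ("license_scanning", false)] : PySem.Dict String Bool)
      = pvD false false false false false false := rfl
  simp only [Spec_check_security_scanners, check_security_scanners, check_security_scanners_alt,
    hinit, pv_fold, Bool.false_or, pvScanners, List.map]
  have e1 := pv_scan jobs "sast" "sast" (by decide) (by decide) (by decide) (by decide) (by decide) (by decide)
  have e2 := pv_scan jobs "secret_detection" "secret-detection" (by decide) (by decide) (by decide) (by decide) (by decide) (by decide)
  have e3 := pv_scan jobs "dependency_scanning" "dependency-scanning" (by decide) (by decide) (by decide) (by decide) (by decide) (by decide)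
  have e4 := pv_scan jobs "container_scanning" "container-scanning" (by decide) (by decide) (by decide) (by decide) (by decide) (by decide)
  have e5 := pv_scan jobs "dast" "dast" (by decide) (by decide) (by decide) (by decide) (by decide) (by decide)
  have e6 := pv_scan jobs "license_scanning" "license-scanning" (by decide) (by decide) (by decide) (by decide) (by decide) (by decide)
  rw [e1, e2, e3, e4, e5, e6]
  rfl
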